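-- pv_equiv track=rewrite | github.com/way-to-mars/liquidata | strings_format.py | combine_lists
-- ===== SOURCE A (Python) =====
-- def combine_lists(list1, string_list):
--     list1.clear()
--     list2 = string_list.split()
--     for item in list2:
--         item_upper = item.upper()
--         if item_upper not in list1:
--             if len(item_upper) > 0:
--                 list1.append(item_upper)
--     return list1
-- ===== SOURCE B (Python) =====
-- def combine_lists(list1, string_list):
--     words = [w.upper() for w in string_list.split()]
--     first = {w: i for i, w in reversed(list(enumerate(words)))}
--     list1.clear()
--     list1.extend(sorted(first, key=first.get))
--     return list1
-- ===== Notes on version B (the rewrite author's own statement) =====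
-- stated objective: alternative
-- what changed: Instead of A's membership-test-and-append loop over a growing result, B records each word's first index in one reversed last-write-wins dict comprehension and then sorts the distinct words by that index, recovering first-seen order by sorting rather than by order-preserving accumulation; list1 is still cleared and refilled in place.
import Mathlib
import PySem

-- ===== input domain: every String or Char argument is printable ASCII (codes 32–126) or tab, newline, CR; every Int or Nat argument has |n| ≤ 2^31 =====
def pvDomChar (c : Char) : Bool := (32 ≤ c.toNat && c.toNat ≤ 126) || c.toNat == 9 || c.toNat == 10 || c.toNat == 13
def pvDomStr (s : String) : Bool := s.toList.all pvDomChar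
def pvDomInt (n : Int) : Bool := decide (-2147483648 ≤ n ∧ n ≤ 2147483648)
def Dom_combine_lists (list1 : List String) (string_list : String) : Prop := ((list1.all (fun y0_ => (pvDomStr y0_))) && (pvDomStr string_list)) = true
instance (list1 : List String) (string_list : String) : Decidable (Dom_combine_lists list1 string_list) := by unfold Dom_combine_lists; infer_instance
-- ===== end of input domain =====

-- B replaces A's membership-test-and-append dedup loop by a first-index map (built with a reversed
-- last-write-wins dict comprehension) followed by a sort of the distinct words by that index; both
-- mutate list1 in place (clear then refill) and the equivalence proved here is about the return value.

-- ===== PORT A =====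
def combine_lists (list1 : List String) (string_list : String) : List String :=
  -- list1.clear(): the loop starts from the emptied list; list2 = string_list.split()
  (PySem.Str.split₀ string_list).foldl
    (fun acc item =>
      let item_upper := PySem.Str.upper item
      if item_upper ∈ acc then acc
      else if PySem.Str.len item_upper > 0 then acc ++ [item_upper]
      else acc)
    []

-- ===== PORT B =====
def combine_lists_alt (list1 : List String) (string_list : String) : List String :=
  -- words = [w.upper() for w in string_list.split()]
  let words := (PySem.Str.split₀ string_list).map PySem.Str.upper
  -- first = {w: i for i, w in reversed(list(enumerate(words)))}
  let first := (PySem.List.enumerate words 0).reverse.foldl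
      (fun d p => PySem.Dict.insert d p.2 p.1) (PySem.Dict.empty)
  -- list1.clear(); list1.extend(sorted(first, key=first.get)); return list1
  -- (every key is present in `first`, so first.get(w) is its stored index: getD with any default)
  PySem.List.sorted (PySem.Dict.keys first) (fun w => PySem.Dict.getD first w 0) false

-- ===== PRECONDITION & SPEC =====
def Spec_combine_lists (list1 : List String) (string_list : String) (out : List String) : Prop := out = combine_lists_alt list1 string_list
instance (list1 : List String) (string_list : String) (out : List String) : Decidable (Spec_combine_lists list1 string_list out) := by unfold Spec_combine_lists; infer_instance

-- ===== CLAIM (what is proved, stated in full; the proofs are below) =====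
def Claim_equal_combine_lists : Prop := ∀ (list1 : List String) (string_list : String), Dom_combine_lists list1 string_list → Spec_combine_lists list1 string_list (combine_lists list1 string_list)

-- ===== LEMMAS AND PROOFS =====

-- every piece produced by str.split() is a nonempty character list
theorem split0_go_ne_nil (s cur : List Char) (acc : List (List Char)) (hacc : ∀ a ∈ acc, a ≠ []) :
    ∀ t ∈ PySem.Chars.split₀.go s cur acc, t ≠ [] := by
  induction s generalizing cur acc with
  | nil =>
      intro t ht
      by_cases hc : cur.isEmpty
      · exact hacc t (by simpa [PySem.Chars.split₀.go, hc] using ht)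
      · rcases (by simpa [PySem.Chars.split₀.go, hc] using ht : t ∈ acc ∨ t = cur.reverse) with h | h
        · exact hacc t h
        · subst h; simpa [List.isEmpty_iff] using hc
  | cons c rest ih =>
      intro t ht
      by_cases hs : PySem.Chars.isspace c
      · by_cases hc : cur.isEmpty
        · exact ih [] acc hacc t (by simpa [PySem.Chars.split₀.go, hs, hc] using ht)
        · refine ih [] (cur.reverse :: acc) ?_ t (by simpa [PySem.Chars.split₀.go, hs, hc] using ht)
          intro a ha
          rcases List.mem_cons.mp ha with h | h
          · subst h; simpa [List.isEmpty_iff] using hc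
          · exact hacc a h
      · exact ih (c :: cur) acc hacc t (by simpa [PySem.Chars.split₀.go, hs] using ht)

theorem split0_tokens_ne_empty (s : String) : ∀ t ∈ PySem.Str.split₀ s, t.toList ≠ [] := by
  intro t ht
  simp only [PySem.Str.split₀, List.mem_map] at ht
  obtain ⟨cs, hcs, rfl⟩ := ht
  have := split0_go_ne_nil s.toList [] [] (by simp) cs (by simpa [PySem.Chars.split₀] using hcs)
  simpa using this

-- A's loop is the ordered dedup of the uppercased tokens
theorem combine_lists_eq_dedup (list1 : List String) (s : String) :
    combine_lists list1 s = PySem.List.dedup ((PySem.Str.split₀ s).map PySem.Str.upper) := by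
  unfold combine_lists
  have h1 : (PySem.Str.split₀ s).foldl
      (fun acc item =>
        let item_upper := PySem.Str.upper item
        if item_upper ∈ acc then acc
        else if PySem.Str.len item_upper > 0 then acc ++ [item_upper]
        else acc) [] =
      (PySem.Str.split₀ s).foldl
        (fun acc item => PySem.Set.add acc (PySem.Str.upper item)) [] := by
    apply PySem.List.foldl_congr_mem
    intro acc item hitem
    have hne : PySem.Chars.upper item.toList ≠ [] := by
      simpa [PySem.Chars.upper] using split0_tokens_ne_empty s item hitem
    by_cases hmem : PySem.Str.upper item ∈ acc <;>
      simp [PySem.Set.add, PySem.Set.contains, hmem, hne]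
  rw [h1, PySem.List.dedup_eq_ofList, PySem.Set.ofList_eq_foldl, List.foldl_map]

-- lookup in the insert fold: the LAST pair inserted for a key wins
theorem get?_foldl_insert_swap (l : List (Int × String)) (d : PySem.Dict String Int) (k : String) :
    (l.foldl (fun d p => PySem.Dict.insert d p.2 p.1) d).get? k =
      match l.reverse.find? (fun p => p.2 == k) with
      | some p => some p.1
      | none => d.get? k := by
  induction l generalizing d with
  | nil => simp
  | cons p t ih =>
      simp only [List.foldl_cons, ih, List.reverse_cons, List.find?_append]
      cases h : t.reverse.find? (fun q => q.2 == k) with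
      | some q => simp
      | none =>
          by_cases hk : p.2 = k
          · subst hk
            simp [List.find?, PySem.Dict.get?_insert_self]
          · have hb : (p.2 == k) = false := by simp [hk]
            simp [List.find?, hb, PySem.Dict.get?_insert_of_ne _ _ (Ne.symm hk)]

-- the first matching pair in enumerate carries the first-occurrence index
theorem find?_enumerate_eq (ws : List String) (w : String) (hw : w ∈ ws) : ∀ s : Int,
    (PySem.List.enumerate ws s).find? (fun p => p.2 == w) = some (s + (ws.idxOf w : Int), w) := by
  induction ws with
  | nil => cases hw
  | cons x t ih =>
      intro s
      by_cases hx : x = w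
      · subst hx; simp [PySem.List.enumerate_cons, List.idxOf_cons_self]
      · have hwt : w ∈ t := by
          rcases List.mem_cons.mp hw with h | h
          · exact absurd h.symm hx
          · exact h
        rw [PySem.List.enumerate_cons, List.find?_cons_of_neg (by simp [hx]),
          ih hwt (s + 1), List.idxOf_cons_ne _ hx]
        simp only [Option.some.injEq, Prod.mk.injEq]
        refine ⟨by push_cast; omega, trivial⟩

-- ordered dedup lists its elements in strictly increasing first-occurrence order
theorem dedup_pairwise_idxOf (ws : List String) :
    (PySem.List.dedup ws).Pairwise (fun a b => ws.idxOf a < ws.idxOf b) := by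
  induction ws using List.reverseRecOn with
  | nil => simp [PySem.List.dedup]
  | append_singleton t x ih =>
      rw [PySem.List.dedup_eq_ofList, PySem.Set.ofList_append_singleton]
      by_cases hx : x ∈ PySem.Set.ofList t
      · rw [PySem.Set.add_of_mem hx]
        rw [PySem.List.dedup_eq_ofList] at ih
        refine ih.imp_of_mem ?_
        intro a b ha hb hab
        have ha' : a ∈ t := (PySem.Set.mem_ofList _ _).mp ha
        have hb' : b ∈ t := (PySem.Set.mem_ofList _ _).mp hb
        rwa [List.idxOf_append_of_mem ha', List.idxOf_append_of_mem hb']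
      · rw [PySem.Set.add_of_not_mem hx, List.pairwise_append]
        rw [PySem.List.dedup_eq_ofList] at ih
        refine ⟨ih.imp_of_mem ?_, by simp, ?_⟩
        · intro a b ha hb hab
          have ha' : a ∈ t := (PySem.Set.mem_ofList _ _).mp ha
          have hb' : b ∈ t := (PySem.Set.mem_ofList _ _).mp hb
          rwa [List.idxOf_append_of_mem ha', List.idxOf_append_of_mem hb']
        · intro a ha b hb
          have ha' : a ∈ t := (PySem.Set.mem_ofList _ _).mp ha
          have hxt : x ∉ t := fun h => hx ((PySem.Set.mem_ofList _ _).mpr h)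
          rcases List.mem_singleton.mp hb with rfl
          rw [List.idxOf_append_of_mem ha', List.idxOf_append_of_notMem hxt]
          simpa using List.idxOf_lt_length_of_mem ha'

-- ===== VERDICT (by name: the statement is the Claim_ definition above) =====
theorem combine_lists_spec : Claim_equal_combine_lists := by
  intro list1 string_list _
  show combine_lists list1 string_list = combine_lists_alt list1 string_list
  rw [combine_lists_eq_dedup]
  unfold combine_lists_alt
  set ws := (PySem.Str.split₀ string_list).map PySem.Str.upper with hws
  set first := (PySem.List.enumerate ws 0).reverse.foldl
      (fun d p => PySem.Dict.insert d p.2 p.1) (PySem.Dict.empty) with hfirst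
  -- key values: first.getD w 0 = idxOf for members of ws
  have hgetD : ∀ w ∈ ws, PySem.Dict.getD first w 0 = (ws.idxOf w : Int) := by
    intro w hw
    rw [hfirst, PySem.Dict.getD_eq_get?_getD, get?_foldl_insert_swap, List.reverse_reverse,
      find?_enumerate_eq ws w hw 0]
    simp
  -- keys of first are exactly the distinct elements of ws
  have hkeys_mem : ∀ w, w ∈ PySem.Dict.keys first ↔ w ∈ ws := by
    intro w
    rw [hfirst, PySem.Dict.keys_foldl_insert_key]
    simp [PySem.Set.mem_update, List.map_reverse, PySem.List.map_snd_enumerate]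
  have hkeys_nodup : (PySem.Dict.keys first).Nodup := by
    rw [hfirst]
    exact PySem.Dict.nodup_keys_foldl_insert_key _ _ _ _ (by simp)
  have hperm : (PySem.List.dedup ws).Perm (PySem.Dict.keys first) := by
    rw [List.perm_ext_iff_of_nodup (by simp [PySem.List.dedup_eq_ofList, PySem.Set.nodup_ofList]) hkeys_nodup]
    intro w
    rw [hkeys_mem]
    simp [PySem.List.dedup_eq_ofList, PySem.Set.mem_ofList]
  refine (PySem.List.sorted_eq_of_perm_of_pairwise_lt _ _ (fun w => PySem.Dict.getD first w 0) hperm ?_).symm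
  refine (dedup_pairwise_idxOf ws).imp_of_mem ?_
  intro a b ha hb hab
  have ha' : a ∈ ws := by simpa [PySem.List.dedup_eq_ofList, PySem.Set.mem_ofList] using ha
  have hb' : b ∈ ws := by simpa [PySem.List.dedup_eq_ofList, PySem.Set.mem_ofList] using hb
  simp only [hgetD a ha', hgetD b hb']
  exact_mod_cast hab
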